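-- pv_equiv track=rewrite | github.com/HoneyJung/HN | public/images/portfolio/algo/2163.py | dp
-- ===== SOURCE A (Python) =====
-- def dp(n,m,x):
--     if n==1 and m==1:
--         return x[0]
--     if n > m :
--         if n%2 == 0:
--             dp(int(n/2),m,x)
--             dp(int(n/2),m,x)
--             x[0] = x[0] + 1
--             return x[0]
--         else:
--             dp(int(n/2),m,x)
--             dp(int(n/2) + 1,m,x)
--             x[0] = x[0] + 1
--             return x[0]
--     else:
--         if m%2 == 0:
--             dp(n,int(m/2),x)
--             dp(n,int(m/2),x)
--             x[0] = x[0] + 1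
--             return x[0]
--         else:
--             dp(n,int(m/2),x)
--             dp(n,int(m/2)+1,x)
--             x[0] = x[0] + 1
--             return x[0]
-- ===== SOURCE B (Python) =====
-- def dp(n, m, x):
--     # closed form: a full split of an n*m bar always takes n*m - 1 breaks,
--     # each of which increments x[0] in A; mutate x[0] the same way.
--     x[0] += n * m - 1
--     return x[0]
-- ===== Notes on version B (the rewrite author's own statement) =====
-- stated objective: faster
-- what changed: Replaces the O(n*m) halving recursion (one increment per break) with the closed form x[0] + n*m - 1, since any full split of an n x m bar takes exactly n*m-1 breaks; Pre_ excludes n<1 or m<1 (A recurses forever, RecursionError) and empty x (IndexError).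
import Mathlib
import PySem

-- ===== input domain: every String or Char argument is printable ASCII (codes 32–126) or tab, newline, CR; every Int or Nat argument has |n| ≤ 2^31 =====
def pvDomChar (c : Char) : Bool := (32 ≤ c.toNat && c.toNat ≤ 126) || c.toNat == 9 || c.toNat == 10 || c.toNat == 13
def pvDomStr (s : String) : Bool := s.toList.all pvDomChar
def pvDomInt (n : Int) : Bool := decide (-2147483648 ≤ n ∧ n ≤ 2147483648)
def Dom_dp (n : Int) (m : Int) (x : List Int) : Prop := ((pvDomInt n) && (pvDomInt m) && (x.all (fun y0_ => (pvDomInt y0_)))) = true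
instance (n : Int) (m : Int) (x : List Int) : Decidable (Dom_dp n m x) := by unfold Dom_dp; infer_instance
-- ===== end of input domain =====

-- ===== PORT A =====
-- B changes only the computation of the return value; A also mutates x[0] step by step while
-- B assigns it once — the final value of x[0] and the return value coincide (return value is what is proved).
-- The recursion threads the current value of x[0] (the only state A's recursion touches);
-- fuel only makes the same computation total (A diverges for n < 1 or m < 1, excluded by Pre_).
-- Python's int(n/2) truncates toward zero: Int.tdiv (exact here, |n| ≤ 2^31 < 2^53).
def dpGo : Nat → Int → Int → Int → Int
  | 0, _, _, v => v
  | fuel + 1, n, m, v =>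
    if n = 1 ∧ m = 1 then v
    else if n > m then
      if n % 2 = 0 then
        (dpGo fuel (n.tdiv 2) m (dpGo fuel (n.tdiv 2) m v)) + 1
      else
        (dpGo fuel (n.tdiv 2 + 1) m (dpGo fuel (n.tdiv 2) m v)) + 1
    else
      if m % 2 = 0 then
        (dpGo fuel n (m.tdiv 2) (dpGo fuel n (m.tdiv 2) v)) + 1
      else
        (dpGo fuel n (m.tdiv 2 + 1) (dpGo fuel n (m.tdiv 2) v)) + 1

def dp (n : Int) (m : Int) (x : List Int) : Int :=
  dpGo (n.toNat + m.toNat + 2) n m ((PySem.List.pyGet? x 0).getD 0)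

-- ===== PORT B =====
def dp_alt (n : Int) (m : Int) (x : List Int) : Int :=
  (PySem.List.pyGet? x 0).getD 0 + n * m - 1

-- ===== PRECONDITION & SPEC =====
-- Pre_ excludes n < 1 or m < 1 (A recurses forever: RecursionError) and empty x (IndexError).
def Pre_dp (n : Int) (m : Int) (x : List Int) : Prop := 1 ≤ n ∧ 1 ≤ m ∧ x ≠ []
instance (n : Int) (m : Int) (x : List Int) : Decidable (Pre_dp n m x) := by unfold Pre_dp; infer_instance
def pvWitness_dp : Int × Int × List Int := (3, 4, [0])

def Spec_dp (n : Int) (m : Int) (x : List Int) (out : Int) : Prop := out = dp_alt n m x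
instance (n : Int) (m : Int) (x : List Int) (out : Int) : Decidable (Spec_dp n m x out) := by unfold Spec_dp; infer_instance

-- ===== CLAIM (what is proved, stated in full; the proofs are below) =====
def Claim_equal_dp : Prop := ∀ (n : Int) (m : Int) (x : List Int), Dom_dp n m x → Pre_dp n m x → Spec_dp n m x (dp n m x)

-- ===== LEMMAS AND PROOFS =====

theorem dpGo_closed (fuel : Nat) : ∀ (n m v : Int), 1 ≤ n → 1 ≤ m → n + m ≤ fuel →
    dpGo fuel n m v = v + n * m - 1 := by
  induction fuel with
  | zero => intro n m v hn hm h; omega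
  | succ f ih =>
    intro n m v hn hm h
    by_cases hb : n = 1 ∧ m = 1
    · obtain ⟨h1, h2⟩ := hb; subst h1; subst h2; rw [dpGo]; norm_num
    · have htn : n.tdiv 2 = n / 2 := Int.tdiv_eq_ediv_of_nonneg (by omega)
      have htm : m.tdiv 2 = m / 2 := Int.tdiv_eq_ediv_of_nonneg (by omega)
      by_cases hnm : n > m
      · by_cases he : n % 2 = 0
        · have h2 : (2:Int) ≤ n := by omega
          rw [dpGo]; simp only [hb, hnm, he, htn, reduceIte]
          rw [ih (n / 2) m v (by omega) hm (by omega),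
              ih (n / 2) m _ (by omega) hm (by omega)]
          have hk : n / 2 * 2 = n := by omega
          nlinarith [hk]
        · have h3 : (3:Int) ≤ n := by omega
          rw [dpGo]; simp only [hb, hnm, he, htn, reduceIte]
          rw [ih (n / 2) m v (by omega) hm (by omega),
              ih (n / 2 + 1) m _ (by omega) hm (by omega)]
          have hk : n / 2 * 2 + 1 = n := by omega
          nlinarith [hk]
      · have hm2 : (2:Int) ≤ m := by omega
        by_cases he : m % 2 = 0
        · rw [dpGo]; simp only [hb, hnm, he, htm, reduceIte]
          rw [ih n (m / 2) v hn (by omega) (by omega),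
              ih n (m / 2) _ hn (by omega) (by omega)]
          have hk : m / 2 * 2 = m := by omega
          nlinarith [hk]
        · have h3 : (3:Int) ≤ m := by omega
          rw [dpGo]; simp only [hb, hnm, he, htm, reduceIte]
          rw [ih n (m / 2) v hn (by omega) (by omega),
              ih n (m / 2 + 1) _ hn (by omega) (by omega)]
          have hk : m / 2 * 2 + 1 = m := by omega
          nlinarith [hk]

-- ===== VERDICT (by name: the statement is the Claim_ definition above) =====
theorem dp_spec : Claim_equal_dp := by
  intro n m x _ hpre
  obtain ⟨hn, hm, _⟩ := hpre
  unfold Spec_dp dp dp_alt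
  exact dpGo_closed _ n m _ hn hm (by omega)
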